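-- pv_equiv track=rewrite | github.com/durgaprasad35/Myworks | optimalstorage.py | optimal_merge_pattern
-- ===== SOURCE A (Python) =====
-- import heapq
--
-- def optimal_merge_pattern(file_sizes):
--     if not file_sizes:
--         return 0
--     heapq.heapify(file_sizes)
--     total_cost = 0
--     while len(file_sizes)>1:
--         first = heapq.heappop(file_sizes)
--         second = heapq.heappop(file_sizes)
--         merged_file = first + second
--         total_cost += merged_file
--         heapq.heappush(file_sizes,merged_file)
--     return total_cost
-- ===== SOURCE B (Python) =====
-- def optimal_merge_pattern(file_sizes):
--     # Sorted-list strategy instead of a binary heap: sort once (in place, same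
--     # object, like A's heapify), then repeatedly merge the two front elements
--     # and insert the merged size back at its sorted position by a linear scan.
--     file_sizes.sort()
--     total_cost = 0
--     while len(file_sizes) > 1:
--         merged = file_sizes.pop(0) + file_sizes.pop(0)
--         total_cost += merged
--         i = 0
--         while i < len(file_sizes) and file_sizes[i] <= merged:
--             i += 1
--         file_sizes.insert(i, merged)
--     return total_cost
-- ===== Notes on version B (the rewrite author's own statement) =====
-- stated objective: alternative
-- what changed: Replaces the heapq binary heap with a plain sorted list: sort once, then repeatedly pop the two front (smallest) sizes and re-insert their sum at its sorted position by a linear scan.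
import Mathlib
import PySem

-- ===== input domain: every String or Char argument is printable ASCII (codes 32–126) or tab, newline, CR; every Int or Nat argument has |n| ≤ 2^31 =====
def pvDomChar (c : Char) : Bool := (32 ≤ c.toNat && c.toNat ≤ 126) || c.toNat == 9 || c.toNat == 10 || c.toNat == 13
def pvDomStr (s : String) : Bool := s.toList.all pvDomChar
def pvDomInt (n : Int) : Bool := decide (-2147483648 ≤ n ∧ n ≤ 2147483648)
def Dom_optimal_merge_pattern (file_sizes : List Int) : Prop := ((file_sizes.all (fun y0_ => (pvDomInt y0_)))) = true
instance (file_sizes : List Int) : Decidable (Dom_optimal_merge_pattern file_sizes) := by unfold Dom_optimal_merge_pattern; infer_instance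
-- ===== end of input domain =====

-- B replaces A's heapq binary heap by a once-sorted list with pop-two-front /
-- linear re-insertion; equivalence is about the RETURN value only (both Pythons
-- mutate the argument in place, ending in the same final state [total sum]).

-- ===== PORT A =====
-- heapq is modelled by its contract: heappop returns and removes the minimum
-- element, heappush appends.  Exact for Int elements: the returned total only
-- depends on the multiset of sizes, never on the heap's internal layout.
def pvHeappop (l : List Int) : Option (Int × List Int) :=
  match PySem.List.min? l (fun x => x) with
  | none => none
  | some m => some (m, l.erase m)

def pvLoopA : Nat → List Int → Int → Int
  | 0, _, c => c
  | fuel + 1, l, c =>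
    if l.length ≤ 1 then c
    else
      match pvHeappop l with
      | none => c
      | some (m1, l1) =>
        match pvHeappop l1 with
        | none => c
        | some (m2, l2) => pvLoopA fuel (l2 ++ [m1 + m2]) (c + (m1 + m2))

def optimal_merge_pattern (file_sizes : List Int) : Int :=
  if file_sizes = [] then 0
  else pvLoopA file_sizes.length file_sizes 0

-- ===== PORT B =====
-- linear-scan insertion into a sorted list (Source B's inner while + insert):
-- skips every element ≤ v, i.e. inserts after equal elements.
def pvInsort (v : Int) : List Int → List Int
  | [] => [v]
  | x :: xs => if x ≤ v then x :: pvInsort v xs else v :: x :: xs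

theorem pvInsort_length (v : Int) (l : List Int) :
    (pvInsort v l).length = l.length + 1 := by
  induction l with
  | nil => rfl
  | cons x xs ih => simp only [pvInsort]; split <;> simp [ih]

def pvLoopB (l : List Int) (c : Int) : Int :=
  match l with
  | a :: b :: rest => pvLoopB (pvInsort (a + b) rest) (c + (a + b))
  | _ => c
termination_by l.length
decreasing_by simp [pvInsort_length]

def optimal_merge_pattern_alt (file_sizes : List Int) : Int :=
  pvLoopB (PySem.List.sorted file_sizes (fun x => x) false) 0

-- ===== PRECONDITION & SPEC =====
def Spec_optimal_merge_pattern (file_sizes : List Int) (out : Int) : Prop := out = optimal_merge_pattern_alt file_sizes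
instance (file_sizes : List Int) (out : Int) : Decidable (Spec_optimal_merge_pattern file_sizes out) := by unfold Spec_optimal_merge_pattern; infer_instance

-- ===== CLAIM (what is proved, stated in full; the proofs are below) =====
def Claim_equal_optimal_merge_pattern : Prop := ∀ (file_sizes : List Int), Dom_optimal_merge_pattern file_sizes → Spec_optimal_merge_pattern file_sizes (optimal_merge_pattern file_sizes)

-- ===== LEMMAS AND PROOFS =====

theorem pvInsort_perm (v : Int) (l : List Int) : (pvInsort v l).Perm (v :: l) := by
  induction l with
  | nil => exact List.Perm.refl _
  | cons x xs ih =>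
    simp only [pvInsort]
    split
    · exact (ih.cons x).trans (List.Perm.swap v x xs)
    · exact List.Perm.refl _

theorem pvInsort_pairwise (v : Int) (l : List Int) (h : l.Pairwise (· ≤ ·)) :
    (pvInsort v l).Pairwise (· ≤ ·) := by
  induction l with
  | nil => simp [pvInsort]
  | cons x xs ih =>
    simp only [pvInsort]
    rcases h with _ | ⟨hx, hxs⟩
    split
    · refine List.Pairwise.cons ?_ (ih hxs)
      intro y hy
      rcases List.mem_cons.mp ((pvInsort_perm v xs).mem_iff.mp hy) with rfl | hy'
      · assumption
      · exact hx y hy'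
    · refine List.Pairwise.cons ?_ (List.Pairwise.cons hx hxs)
      intro y hy
      rcases List.mem_cons.mp hy with rfl | hy'
      · omega
      · exact le_trans (by omega) (hx y hy')

theorem pvLoopB_nil (c : Int) : pvLoopB [] c = c := by
  rw [pvLoopB] <;> simp

theorem pvLoopB_single (x c : Int) : pvLoopB [x] c = c := by
  rw [pvLoopB] <;> simp

-- the first extremal element of any rearrangement of a sorted list is its head
theorem pv_min_of_perm_sorted {l t : List Int} {a : Int} (hp : l.Perm (a :: t))
    (hs : (a :: t).Pairwise (· ≤ ·)) :
    PySem.List.min? l (fun x => x) = some a := by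
  rcases hm : PySem.List.min? l (fun x => x) with _ | m
  · rw [PySem.List.min?_eq_none_iff] at hm
    subst hm
    exact absurd hp.symm (by simp)
  · have hmem : m ∈ l := PySem.List.min?_mem hm
    have hma : m ≤ a := PySem.List.min?_isMin hm a (hp.mem_iff.mpr (by simp))
    have ham : a ≤ m := by
      rcases List.mem_cons.mp (hp.mem_iff.mp hmem) with rfl | hmt
      · exact le_refl _
      · exact (List.pairwise_cons.mp hs).1 m hmt
    rw [le_antisymm hma ham]

theorem pvLoop_eq : ∀ (fuel : Nat) (l t : List Int) (c : Int), l.length ≤ fuel →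
    l.Perm t → t.Pairwise (· ≤ ·) → pvLoopA fuel l c = pvLoopB t c := by
  intro fuel
  induction fuel with
  | zero =>
    intro l t c hn hp _
    have hl : l = [] := List.length_eq_zero_iff.mp (by omega)
    subst hl
    have ht : t = [] := hp.symm.eq_nil
    subst ht
    exact (pvLoopB_nil c).symm
  | succ fuel ih =>
    intro l t c hn hp hs
    rw [pvLoopA]
    by_cases hlen : l.length ≤ 1
    · rw [if_pos hlen]
      have ht : t.length ≤ 1 := by rw [← hp.length_eq]; exact hlen
      rcases t with _ | ⟨x, _ | ⟨y, r⟩⟩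
      · rw [pvLoopB_nil]
      · rw [pvLoopB_single]
      · simp at ht
    · rw [if_neg hlen]
      have htlen : 2 ≤ t.length := by rw [← hp.length_eq]; omega
      rcases t with _ | ⟨a, _ | ⟨b, rest⟩⟩
      · simp at htlen
      · simp at htlen
      · have hmin1 : PySem.List.min? l (fun x => x) = some a :=
          pv_min_of_perm_sorted hp hs
        have hp1 : (l.erase a).Perm (b :: rest) := by
          have := hp.erase a
          simpa using this
        have hs1 : (b :: rest).Pairwise (· ≤ ·) := (List.pairwise_cons.mp hs).2
        have hmin2 : PySem.List.min? (l.erase a) (fun x => x) = some b :=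
          pv_min_of_perm_sorted hp1 hs1
        have hp2 : ((l.erase a).erase b).Perm rest := by
          have := hp1.erase b
          simpa using this
        simp only [pvHeappop, hmin1, hmin2]
        rw [pvLoopB]
        have hp3 : (((l.erase a).erase b) ++ [a + b]).Perm (pvInsort (a + b) rest) :=
          (List.perm_append_comm.trans (hp2.cons (a + b))).trans
            (pvInsort_perm (a + b) rest).symm
        have hs3 : (pvInsort (a + b) rest).Pairwise (· ≤ ·) :=
          pvInsort_pairwise _ _ (List.pairwise_cons.mp hs1).2
        have hle : (((l.erase a).erase b) ++ [a + b]).length ≤ fuel := by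
          have ha : a ∈ l := hp.mem_iff.mpr (by simp)
          have hb : b ∈ l.erase a := hp1.mem_iff.mpr (by simp)
          have h1 := List.length_erase_of_mem ha
          have h2 := List.length_erase_of_mem hb
          simp only [List.length_append, List.length_singleton]
          omega
        exact ih _ _ _ hle hp3 hs3

-- ===== VERDICT (by name: the statement is the Claim_ definition above) =====
theorem optimal_merge_pattern_spec : Claim_equal_optimal_merge_pattern := by
  intro l _
  unfold Spec_optimal_merge_pattern optimal_merge_pattern optimal_merge_pattern_alt
  split
  · subst ‹l = []›
    have h0 : PySem.List.sorted ([] : List Int) (fun x => x) false = [] := by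
      rw [PySem.List.sorted_eq_nil_iff]
    rw [h0, pvLoopB_nil]
  · exact pvLoop_eq l.length l (PySem.List.sorted l (fun x => x) false) 0 le_rfl
      (PySem.List.sorted_perm ..).symm (by simpa using PySem.List.sorted_pairwise l (fun x => x))
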